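-- pv_equiv track=rewrite | github.com/royalneverwin/Leetcode | 重新格式化电话号码.py | reformatNumber
-- ===== SOURCE A (Python) =====
-- def reformatNumber(number: str) -> str:
--     idx = 0
--     while idx < len(number):
--         if number[idx] == ' ' or number[idx] == '-':
--             number = number[0:idx] + number[idx+1:]
--         else:
--             idx += 1
--
--     res = ''
--     while len(number) > 4:
--         res += number[0:3]
--         res += '-'
--         number = number[3:]
--
--     if len(number) < 4:
--         res += number
--     else:
--         res += number[0:2] + '-' + number[2:]
--     return res
-- ===== SOURCE B (Python) =====
-- def reformatNumber(number: str) -> str: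
--     s = ''.join(ch for ch in number if ch not in ' -')
--     n = len(s)
--     if n % 3 == 1 and n > 3:
--         head, tail = s[:n - 4], [s[n - 4:n - 2], s[n - 2:]]
--     elif n % 3 == 2:
--         head, tail = s[:n - 2], [s[n - 2:]]
--     else:
--         head, tail = s, []
--     parts = [head[i:i + 3] for i in range(0, len(head), 3)] + tail
--     return '-'.join(parts)
-- ===== Notes on version B (the rewrite author's own statement) =====
-- stated objective: faster
-- what changed: Separators are removed in one filtering pass instead of repeated in-place string splicing, and the dash groups are computed up front from len(s) mod 3 (chunk comprehension plus an explicit 2/2+2 tail) instead of peeling 3 characters off the front in a loop with a tail fix-up.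
import Mathlib
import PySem

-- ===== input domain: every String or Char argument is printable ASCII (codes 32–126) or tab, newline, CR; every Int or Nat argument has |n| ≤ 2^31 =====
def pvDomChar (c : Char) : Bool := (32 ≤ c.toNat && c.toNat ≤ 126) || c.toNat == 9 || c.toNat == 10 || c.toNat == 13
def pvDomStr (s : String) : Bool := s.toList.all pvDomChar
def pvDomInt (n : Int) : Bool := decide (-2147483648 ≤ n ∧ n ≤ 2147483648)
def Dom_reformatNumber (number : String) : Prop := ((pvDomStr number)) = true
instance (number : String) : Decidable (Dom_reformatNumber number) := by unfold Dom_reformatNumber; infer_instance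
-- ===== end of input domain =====

-- B removes separators in one filtering pass and computes the dash groups up front from
-- len(s) mod 3 (a chunk map plus an explicit 2 / 2+2 tail) instead of A's character
-- splice-out loop and peel-3-off-the-front loop with a tail fix-up.

-- ===== PORT A =====
-- while loop deleting number[idx] when it is ' ' or '-'; the slices number[0:idx] and
-- number[idx+1:] have nonnegative in-range bounds, so take/drop is exact there.
-- fuel = number.length bounds the loop (each step either removes a character or
-- advances idx), keeping the recursion structural.
def pvStripA (fuel : Nat) (number : List Char) (idx : Nat) : List Char :=
  match fuel with
  | 0 => number
  | fuel + 1 =>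
    if h : idx < number.length then
      if number[idx] = ' ' ∨ number[idx] = '-' then
        pvStripA fuel (number.take idx ++ number.drop (idx + 1)) idx
      else
        pvStripA fuel number (idx + 1)
    else number

-- second while loop: res += number[0:3] + '-'; number = number[3:]   (nonnegative slices)
-- fuel > number.length bounds the loop (each step drops 3 characters), keeping the
-- recursion structural.
def pvGroupA (fuel : Nat) (number : List Char) (res : List Char) : List Char :=
  match fuel with
  | 0 => res
  | fuel + 1 =>
    if 4 < number.length then
      pvGroupA fuel (number.drop 3) (res ++ number.take 3 ++ ['-'])
    else if number.length < 4 then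
      res ++ number
    else
      res ++ number.take 2 ++ '-' :: number.drop 2

def reformatNumber (number : String) : String :=
  String.mk (pvGroupA ((pvStripA number.toList.length number.toList 0).length + 1)
    (pvStripA number.toList.length number.toList 0) [])

-- ===== PORT B =====
-- ''.join(ch for ch in number if ch not in ' -') is the filter; the chunk comprehension
-- [head[i:i+3] for i in range(0, len(head), 3)] is the map over pyRange; '-'.join is
-- List.intercalate ['-'].  The slices s[:n-4], s[n-4:n-2], s[n-2:] have nonnegative
-- bounds in their branches, so take/drop is exact there.
def reformatNumber_alt (number : String) : String :=
  let s := number.toList.filter (fun ch => !(ch == ' ' || ch == '-'))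
  let n := s.length
  let ht :=
    if n % 3 = 1 ∧ 3 < n then
      (s.take (n - 4), [(s.drop (n - 4)).take 2, s.drop (n - 2)])
    else if n % 3 = 2 then
      (s.take (n - 2), [s.drop (n - 2)])
    else
      (s, ([] : List (List Char)))
  let parts := (PySem.List.pyRange 0 (ht.1.length : Int) 3).map
      (fun i => PySem.List.slice ht.1 (some i) (some (i + 3))) ++ ht.2
  String.mk (List.intercalate ['-'] parts)

-- ===== PRECONDITION & SPEC =====
def Spec_reformatNumber (number : String) (out : String) : Prop := out = reformatNumber_alt number
instance (number : String) (out : String) : Decidable (Spec_reformatNumber number out) := by unfold Spec_reformatNumber; infer_instance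

-- ===== CLAIM (what is proved, stated in full; the proofs are below) =====
def Claim_equal_reformatNumber : Prop := ∀ (number : String), Dom_reformatNumber number → Spec_reformatNumber number (reformatNumber number)

-- ===== LEMMAS AND PROOFS =====

-- A's deletion loop keeps the prefix before idx and filters the separators out of the rest.
theorem pvStripA_eq (fuel : Nat) : ∀ (l : List Char) (idx : Nat), l.length - idx ≤ fuel →
    pvStripA fuel l idx = l.take idx ++ (l.drop idx).filter (fun ch => !(ch == ' ' || ch == '-')) := by
  induction fuel with
  | zero =>
    intro l idx h
    have hle : l.length ≤ idx := by omega
    rw [pvStripA]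
    simp [List.take_of_length_le hle, List.drop_eq_nil_of_le hle]
  | succ m ih =>
    intro l idx h
    rw [pvStripA]
    by_cases hlt : idx < l.length
    · rw [dif_pos hlt]
      have hdrop : l.drop idx = l[idx] :: l.drop (idx + 1) := List.drop_eq_getElem_cons hlt
      split_ifs with hsep
      · rw [ih _ idx (by simp only [List.length_append, List.length_take, List.length_drop]; omega)]
        have h₁ : (l.take idx).length = idx := by simp; omega
        rw [List.take_append_of_le_length (le_of_eq h₁.symm)]
        rw [List.take_of_length_le (le_of_eq h₁), List.drop_append_of_le_length (le_of_eq h₁.symm)]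
        rw [List.drop_of_length_le (le_of_eq h₁), List.nil_append, hdrop]
        rcases hsep with h' | h' <;> simp [h']
      · rw [ih l (idx + 1) (by omega), hdrop]
        push_neg at hsep
        rw [List.filter_cons, if_pos (by simp [hsep.1, hsep.2])]
        rw [List.take_add_one, List.getElem?_eq_getElem hlt]
        simp only [Option.toList_some, List.append_assoc, List.singleton_append]
    · rw [dif_neg hlt]
      have hle : l.length ≤ idx := by omega
      simp [List.take_of_length_le hle, List.drop_eq_nil_of_le hle]

-- recursive chunking used to relate the two grouping strategies
def specChunks (h : List Char) : List (List Char) :=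
  if h = [] then [] else h.take 3 :: specChunks (h.drop 3)
termination_by h.length
decreasing_by
  rename_i hne
  have : 0 < h.length := List.length_pos_iff.mpr hne
  simp only [List.length_drop]; omega

theorem specChunks_nil : specChunks [] = [] := by rw [specChunks]; simp

theorem specChunks_ne_nil (h : List Char) (hne : h ≠ []) : specChunks h ≠ [] := by
  rw [specChunks]; simp [hne]

theorem specChunks_small (l : List Char) (h1 : l ≠ []) (h2 : l.length ≤ 3) :
    specChunks l = [l] := by
  rw [specChunks, if_neg h1, List.drop_eq_nil_of_le h2, specChunks_nil,
      List.take_of_length_le h2]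

theorem pyRange3_cons (n : Nat) (hn : 0 < n) :
    PySem.List.pyRange 0 (n : Int) 3 =
      0 :: (PySem.List.pyRange 0 ((n : Int) - 3) 3).map (· + 3) := by
  rw [PySem.List.pyRange_of_pos 0 (n : Int) (by norm_num),
      PySem.List.pyRange_of_pos 0 ((n : Int) - 3) (by norm_num)]
  have hlt : (0 : Int) < (n : Int) := by exact_mod_cast hn
  rw [if_pos hlt]
  by_cases h3 : (0 : Int) < (n : Int) - 3
  · rw [if_pos h3]
    have hcount : (((n : Int) - 0 + 3 - 1) / 3).toNat = (((n : Int) - 3 - 0 + 3 - 1) / 3).toNat + 1 := by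
      omega
    rw [hcount, List.range_succ_eq_map, List.map_cons, List.map_map, List.map_map]
    congr 1
  · rw [if_neg h3]
    have hcount : (((n : Int) - 0 + 3 - 1) / 3).toNat = 1 := by omega
    rw [hcount]
    simp

-- B's chunk comprehension is the recursive 3-chunking
theorem chunks_eq (m : Nat) : ∀ (h : List Char), h.length ≤ m →
    (PySem.List.pyRange 0 (h.length : Int) 3).map
      (fun i => PySem.List.slice h (some i) (some (i + 3))) = specChunks h := by
  induction m with
  | zero =>
    intro h hlen
    have : h = [] := by
      cases h with
      | nil => rfl
      | cons a t => simp at hlen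
    subst this
    simp [specChunks_nil, show PySem.List.pyRange 0 0 3 = [] from rfl]
  | succ m ih =>
    intro h hlen
    by_cases hnil : h = []
    · subst hnil
      simp [specChunks_nil, show PySem.List.pyRange 0 0 3 = [] from rfl]
    · have hpos : 0 < h.length := List.length_pos_iff.mpr hnil
      rw [pyRange3_cons h.length hpos, List.map_cons, List.map_map]
      rw [specChunks, if_neg hnil]
      congr 1
      · show PySem.List.slice h (some 0) (some (0 + 3)) = h.take 3
        rw [zero_add]
        rw [PySem.List.slice_zero_start, PySem.List.slice_to h (by norm_num)]
        rfl
      · by_cases h3 : h.length ≤ 3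
        · have hd : h.drop 3 = [] := List.drop_eq_nil_of_le h3
          rw [hd]
          have : ¬ (0 : Int) < (h.length : Int) - 3 := by omega
          rw [PySem.List.pyRange_of_pos 0 ((h.length : Int) - 3) (by norm_num), if_neg this]
          simp [specChunks_nil]
        · have hcast : (h.length : Int) - 3 = ((h.drop 3).length : Int) := by
            simp; omega
          rw [hcast, ← ih (h.drop 3) (by simp; omega)]
          apply List.map_congr_left
          intro i hi
          have h0i : (0 : Int) ≤ i := by
            have := (PySem.List.mem_pyRange_iff_of_pos (by norm_num : (0:Int) < 3) i).mp hi
            omega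
          simp only [Function.comp]
          rw [PySem.List.slice_toNat h (by omega) (by omega),
              PySem.List.slice_toNat (h.drop 3) h0i (by omega)]
          rw [List.drop_drop]
          have e1 : (i + 3).toNat = i.toNat + 3 := by omega
          have e2 : (i + 3 + 3).toNat = i.toNat + 6 := by omega
          rw [e1, e2, Nat.add_comm 3 i.toNat]
          congr 1
          omega

-- the part list B joins, as a function of the stripped character list
def partsSpec (l : List Char) : List (List Char) :=
  if l.length % 3 = 1 ∧ 3 < l.length then
    specChunks (l.take (l.length - 4)) ++ [(l.drop (l.length - 4)).take 2, l.drop (l.length - 2)]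
  else if l.length % 3 = 2 then
    specChunks (l.take (l.length - 2)) ++ [l.drop (l.length - 2)]
  else specChunks l

theorem partsSpec_ne_nil (l : List Char) (hne : l ≠ []) : partsSpec l ≠ [] := by
  unfold partsSpec
  split_ifs <;> simp_all [specChunks_ne_nil l hne]

theorem alt_eq (number : String) :
    reformatNumber_alt number =
      String.mk (List.intercalate ['-']
        (partsSpec (number.toList.filter (fun ch => !(ch == ' ' || ch == '-'))))) := by
  simp only [reformatNumber_alt, partsSpec]
  split_ifs with h1 h2
  · rw [chunks_eq _ _ le_rfl]
  · rw [chunks_eq _ _ le_rfl]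
  · rw [chunks_eq _ _ le_rfl, List.append_nil]

theorem intercalate_cons_ne (sep a : List Char) (t : List (List Char)) (ht : t ≠ []) :
    List.intercalate sep (a :: t) = a ++ sep ++ List.intercalate sep t := by
  cases t with
  | nil => exact absurd rfl ht
  | cons b t' => simp [List.intercalate, List.intersperse]

theorem partsSpec_step (l : List Char) (hl : 4 < l.length) :
    partsSpec l = l.take 3 :: partsSpec (l.drop 3) := by
  have h3 : l.length % 3 < 3 := Nat.mod_lt _ (by norm_num)
  have hnil : l ≠ [] := by intro hh; subst hh; simp at hl
  unfold partsSpec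
  simp only [List.length_drop]
  have hmod : (l.length - 3) % 3 = l.length % 3 := by omega
  rw [hmod]
  by_cases h1 : l.length % 3 = 1
  · have h7 : 7 ≤ l.length := by omega
    rw [if_pos ⟨h1, by omega⟩, if_pos ⟨h1, by omega⟩]
    have hne : l.take (l.length - 4) ≠ [] := by
      have hlen4 : (l.take (l.length - 4)).length = l.length - 4 := by simp
      intro hh; rw [hh] at hlen4; simp at hlen4; omega
    rw [specChunks, if_neg hne, List.take_take, min_eq_left (by omega), List.drop_take]
    simp only [List.drop_drop, List.cons_append]
    have e1 : l.length - 4 - 3 = l.length - 7 := by omega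
    have e2 : l.length - 3 - 4 = l.length - 7 := by omega
    have e3 : 3 + (l.length - 7) = l.length - 4 := by omega
    have e4 : l.length - 3 - 2 = l.length - 5 := by omega
    have e5 : 3 + (l.length - 5) = l.length - 2 := by omega
    simp only [e1, e2, e3, e4, e5]
  · by_cases h2 : l.length % 3 = 2
    · have h5 : 5 ≤ l.length := by omega
      rw [if_neg (show ¬(l.length % 3 = 1 ∧ 3 < l.length) from fun hc => h1 hc.1),
          if_neg (show ¬(l.length % 3 = 1 ∧ 3 < l.length - 3) from fun hc => h1 hc.1),
          if_pos h2, if_pos h2]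
      have hne : l.take (l.length - 2) ≠ [] := by
        have hlen2 : (l.take (l.length - 2)).length = l.length - 2 := by simp
        intro hh; rw [hh] at hlen2; simp at hlen2; omega
      rw [specChunks, if_neg hne, List.take_take, min_eq_left (by omega), List.drop_take]
      simp only [List.drop_drop, List.cons_append]
      have e1 : l.length - 2 - 3 = l.length - 5 := by omega
      have e2 : l.length - 3 - 2 = l.length - 5 := by omega
      have e3 : 3 + (l.length - 5) = l.length - 2 := by omega
      rw [e1, e2, e3]
    · rw [if_neg (show ¬(l.length % 3 = 1 ∧ 3 < l.length) from fun hc => h1 hc.1),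
          if_neg (show ¬(l.length % 3 = 1 ∧ 3 < l.length - 3) from fun hc => h1 hc.1),
          if_neg h2, if_neg h2]
      rw [specChunks, if_neg hnil]

theorem pvGroupA_acc (fuel : Nat) : ∀ (l res : List Char), l.length < fuel →
    pvGroupA fuel l res = res ++ pvGroupA fuel l [] := by
  induction fuel with
  | zero =>
    intro l res h
    simp at h
  | succ m ih =>
    intro l res h
    conv_lhs => rw [pvGroupA]
    conv_rhs => rw [pvGroupA]
    split_ifs with h1
    · rw [ih (l.drop 3) _ (by simp; omega), ih (l.drop 3) ([] ++ List.take 3 l ++ ['-']) (by simp; omega)]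
      simp
    all_goals simp

theorem groupA_eq (fuel : Nat) : ∀ (l : List Char), l.length < fuel →
    pvGroupA fuel l [] = List.intercalate ['-'] (partsSpec l) := by
  induction fuel with
  | zero =>
    intro l h
    simp at h
  | succ m ih =>
    intro l h
    by_cases h4 : 4 < l.length
    · conv_lhs => rw [pvGroupA]
      rw [if_pos h4]
      rw [pvGroupA_acc m (l.drop 3) _ (by simp; omega)]
      rw [ih (l.drop 3) (by simp; omega)]
      rw [partsSpec_step l h4]
      rw [intercalate_cons_ne ['-'] _ _ (partsSpec_ne_nil _ (by
        intro hh; have := congrArg List.length hh; simp at this; omega))]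
      simp
    · conv_lhs => rw [pvGroupA]
      rw [if_neg h4]
      split_ifs with hlt
      · by_cases hn : l = []
        · subst hn; simp [partsSpec, specChunks_nil, List.intercalate]
        · have hle3 : l.length ≤ 3 := by omega
          unfold partsSpec
          rw [if_neg (by rintro ⟨_, hgt⟩; omega)]
          by_cases h2 : l.length % 3 = 2
          · have hn2 : l.length = 2 := by
              have := List.length_pos_iff.mpr hn
              omega
            rw [if_pos h2, hn2]
            norm_num
            simp [specChunks_nil, List.intercalate]
          · rw [if_neg h2, specChunks_small l hn hle3]
            simp [List.intercalate]
      · have hn4 : l.length = 4 := by omega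
        unfold partsSpec
        rw [if_pos ⟨by omega, by omega⟩, hn4]
        norm_num
        simp [specChunks_nil, List.intercalate, List.intersperse]

-- ===== VERDICT (by name: the statement is the Claim_ definition above) =====
theorem reformatNumber_spec : Claim_equal_reformatNumber := by
  intro number _
  unfold Spec_reformatNumber
  rw [alt_eq, reformatNumber]
  rw [pvStripA_eq (number.toList.length) number.toList 0 (by omega)]
  simp only [List.take_zero, List.drop_zero, List.nil_append]
  rw [groupA_eq ((number.toList.filter (fun ch => !(ch == ' ' || ch == '-'))).length + 1) _
    (Nat.lt_succ_self _)]
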